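-- pv_equiv track=rewrite | github.com/ekiauhce/interval-to-regexp | main.py | get_minutes
-- ===== SOURCE A (Python) =====
-- def get_seconds(start: str, end: str):
--     if start == end:
--         return start
--     i_start = int(start)
--     i_end = int(end)
--
--     start_div, start_rem = i_start // 10, i_start % 10
--     end_div, end_rem = i_end // 10, i_end % 10
--
--     if start_div == end_div:
--         return f'{start_div}[{start_rem}-{end_rem}]'
--
--     return f'{start_div}[{start_rem}-9]' + '|' + get_seconds(f'{start_div+1}0', end)
--
-- def get_minutes(start: str, end: str):
--     if start == end:
--         return start
--
--     start_mins, start_secs = start.split(':')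
--     end_mins, end_secs = end.split(':')
--
--
--     if start_mins == end_mins:
--         if start_secs == '00' and end_secs == '59':
--             return f'{start_mins}:[0-5][0-9]'
--         return f'{start_mins}:({get_seconds(start_secs, end_secs)})'
--
--
--     i_start_mins = int(start_mins)
--     i_end_mins = int(end_mins)
--     result = get_minutes(start, f'{start_mins}:59')
--     if i_start_mins < 59 and i_end_mins > 0 and i_end_mins - i_start_mins > 1:
--         result += '|' + get_minutes(f'{i_start_mins+1:02d}:00', f'{i_end_mins-1:02d}:59')
--     result += '|' + get_minutes(f'{end_mins}:00', end)
--     return result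
-- ===== SOURCE B (Python) =====
-- def get_seconds(start: str, end: str):
--     if start == end:
--         return start
--     i_start = int(start)
--     i_end = int(end)
--
--     start_div, start_rem = i_start // 10, i_start % 10
--     end_div, end_rem = i_end // 10, i_end % 10
--
--     if start_div == end_div:
--         return f'{start_div}[{start_rem}-{end_rem}]'
--
--     return f'{start_div}[{start_rem}-9]' + '|' + get_seconds(f'{start_div+1}0', end)
--
--
-- def _piece(mm: str, lo: str, hi: str) -> str:
--     if lo == hi:
--         return f'{mm}:{lo}'
--     if lo == '00' and hi == '59':
--         return f'{mm}:[0-5][0-9]'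
--     return f'{mm}:({get_seconds(lo, hi)})'
--
--
-- def get_minutes(start: str, end: str):
--     if start == end:
--         return start
--     start_mins, start_secs = start.split(':')
--     end_mins, end_secs = end.split(':')
--     if start_mins == end_mins:
--         parts = [_piece(start_mins, start_secs, end_secs)]
--     else:
--         i_start = int(start_mins)
--         i_end = int(end_mins)
--         parts = []
--         for m in range(i_start, i_end + 1):
--             lo = start_secs if m == i_start else '00'
--             hi = end_secs if m == i_end else '59'
--             mm = start_mins if m == i_start else (end_mins if m == i_end else f'{m:02d}')
--             parts.append(_piece(mm, lo, hi))
--     return '|'.join(parts)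
-- ===== Notes on version B (the rewrite author's own statement) =====
-- stated objective: simpler
-- what changed: Replaces A's three-way recursive splitting over minute ranges by a same-minute fast path plus one flat loop over the minutes from start to end that emits one alternation piece per minute and joins them with '|'; get_seconds is kept unchanged.
-- outside the precondition, e.g. on get_minutes('10:00', '05:30'): A returns '10:[0-5][0-9]|05:(0[0-9]|1[0-9]|2[0-9]|30)', B returns ''
import Mathlib
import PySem

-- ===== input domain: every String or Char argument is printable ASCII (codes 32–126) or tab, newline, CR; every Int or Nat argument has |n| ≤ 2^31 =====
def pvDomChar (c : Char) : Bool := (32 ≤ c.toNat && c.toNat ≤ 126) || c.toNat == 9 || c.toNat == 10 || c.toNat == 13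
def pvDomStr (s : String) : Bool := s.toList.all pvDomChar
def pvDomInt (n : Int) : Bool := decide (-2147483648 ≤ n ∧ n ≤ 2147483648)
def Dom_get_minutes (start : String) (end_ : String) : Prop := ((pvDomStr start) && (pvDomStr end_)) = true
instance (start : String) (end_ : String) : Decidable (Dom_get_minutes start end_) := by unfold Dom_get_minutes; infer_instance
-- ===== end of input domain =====

-- B replaces A's three-way recursive interval splitting by one flat loop over the minutes, one
-- alternation piece per minute, joined with '|' (objective: simpler; get_seconds is kept unchanged).

-- ===== PORT A =====
-- fuel for the get_seconds recursion (both Pythons contain the identical helper; its recursion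
-- depth is at most 7 on every input admitted by Pre_, so the fuel is never exhausted there)
def pvSecFuel : Nat := 64
-- fuel for A's get_minutes recursion (depth ≤ 61 on inputs admitted by Pre_)
def pvGmFuel : Nat := 256

-- shared helper: literal transliteration of get_seconds (identical text in Source A and Source B);
-- [] stands for the inputs where int() raises ValueError (excluded by Pre_)
def pvGsF : Nat → List Char → List Char → List Char
  | 0, _, _ => []
  | fuel+1, s, e =>
    if s = e then s else
    match PySem.Int.ofChars? s, PySem.Int.ofChars? e with
    | some a, some b =>
      let sd := PySem.Int.floordiv a 10
      let sr := PySem.Int.mod a 10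
      let ed := PySem.Int.floordiv b 10
      let er := PySem.Int.mod b 10
      if sd = ed then PySem.Int.toChars sd ++ '[' :: PySem.Int.toChars sr ++ '-' :: PySem.Int.toChars er ++ [']']
      else (PySem.Int.toChars sd ++ '[' :: PySem.Int.toChars sr ++ ['-', '9', ']']) ++ '|' :: pvGsF fuel (PySem.Int.toChars (sd+1) ++ ['0']) e
    | _, _ => []

-- f'{n:02d}' (exact for width 2: zero-pad after the sign, like Python's 0-fill)
def pvPad2 (n : Int) : List Char := PySem.Chars.zfill (PySem.Int.toChars n) 2

-- literal transliteration of A's get_minutes; [] stands for the inputs where split-unpacking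
-- or int() raises (excluded by Pre_)
def pvGmF : Nat → List Char → List Char → List Char
  | 0, _, _ => []
  | fuel+1, s, e =>
    if s = e then s else
    match PySem.Chars.splitOn s [':'], PySem.Chars.splitOn e [':'] with
    | [sm, ss], [em, es] =>
      if sm = em then
        if ss = ['0','0'] ∧ es = ['5','9'] then sm ++ [':', '[', '0', '-', '5', ']', '[', '0', '-', '9', ']']
        else sm ++ [':', '('] ++ pvGsF pvSecFuel ss es ++ [')']
      else
        match PySem.Int.ofChars? sm, PySem.Int.ofChars? em with
        | some a, some b =>
          let r1 := pvGmF fuel s (sm ++ [':', '5', '9'])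
          let r2 := if a < 59 ∧ 0 < b ∧ 1 < b - a
                    then r1 ++ '|' :: pvGmF fuel (pvPad2 (a+1) ++ [':', '0', '0']) (pvPad2 (b-1) ++ [':', '5', '9'])
                    else r1
          r2 ++ '|' :: pvGmF fuel (em ++ [':', '0', '0']) e
        | _, _ => []
    | _, _ => []

def get_minutes (start : String) (end_ : String) : String :=
  String.ofList (pvGmF pvGmFuel start.toList end_.toList)

-- ===== PORT B =====
-- Source B's _piece helper
def pvPieceCore (mm lo hi : List Char) : List Char :=
  if lo = hi then mm ++ ':' :: lo
  else if lo = ['0','0'] ∧ hi = ['5','9'] then mm ++ [':', '[', '0', '-', '5', ']', '[', '0', '-', '9', ']']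
  else mm ++ ':' :: '(' :: pvGsF pvSecFuel lo hi ++ [')']

-- one alternation piece for minute m of the interval (the body of Source B's loop)
def pvPieceB (sm em ss es : List Char) (a b m : Int) : List Char :=
  let lo := if m = a then ss else ['0','0']
  let hi := if m = b then es else ['5','9']
  let mm := if m = a then sm else if m = b then em else pvPad2 m
  pvPieceCore mm lo hi

-- literal transliteration of Source B's get_minutes
def pvAltGo (s e : List Char) : List Char :=
  if s = e then s else
  match PySem.Chars.splitOn s [':'], PySem.Chars.splitOn e [':'] with
  | [sm, ss], [em, es] =>
    if sm = em then PySem.Chars.join ['|'] [pvPieceCore sm ss es]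
    else
      match PySem.Int.ofChars? sm, PySem.Int.ofChars? em with
      | some a, some b =>
        let parts := (PySem.List.pyRange a (b+1) 1).foldl (fun acc m => acc ++ [pvPieceB sm em ss es a b m]) []
        PySem.Chars.join ['|'] parts
      | _, _ => []
  | _, _ => []

def get_minutes_alt (start : String) (end_ : String) : String :=
  String.ofList (pvAltGo start.toList end_.toList)

-- ===== PRECONDITION & SPEC =====
-- the canonical two-digit time string 'MM:SS'
def pvMkT (m s : Int) : List Char := pvPad2 m ++ ':' :: pvPad2 s

-- Pre_ restricts to the function's natural domain: equal strings, ordered pairs of canonical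
-- 'MM:SS' times, and ordered same-minute intervals whose endpoints share the minute field
-- verbatim (ragged second fields allowed).  It excludes: malformed strings, on which A raises
-- (ValueError) or recurses without bound (RecursionError); reversed intervals and minute fields
-- beyond 59, on which A returns an accidental concatenation that skips part of the range; and
-- distinct-minute endpoints with non-canonical minute fields such as '5:00' vs '05:30', whose
-- labels A copies verbatim while numerically equal minutes still recurse.
def Pre_get_minutes (start : String) (end_ : String) : Prop :=
  start = end_ ∨
  (∃ m1 ∈ PySem.List.pyRange 0 60 1, ∃ s1 ∈ PySem.List.pyRange 0 60 1,
    start.toList = pvMkT m1 s1 ∧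
    ∃ m2 ∈ PySem.List.pyRange 0 60 1, ∃ s2 ∈ PySem.List.pyRange 0 60 1,
      end_.toList = pvMkT m2 s2 ∧ 60 * m1 + s1 ≤ 60 * m2 + s2) ∨
  ((PySem.Chars.splitOn start.toList [':']).length = 2 ∧
   (PySem.Chars.splitOn end_.toList [':']).length = 2 ∧
   (PySem.Chars.splitOn start.toList [':']).getD 0 [] = (PySem.Chars.splitOn end_.toList [':']).getD 0 [] ∧
   (PySem.Chars.splitOn start.toList [':']).getD 1 [] ≠ (PySem.Chars.splitOn end_.toList [':']).getD 1 [] ∧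
   ((PySem.Chars.splitOn start.toList [':']).getD 1 [] = ['0','0'] ∧
      (PySem.Chars.splitOn end_.toList [':']).getD 1 [] = ['5','9'] ∨
    ∃ a ∈ PySem.List.pyRange 0 60 1, ∃ b ∈ PySem.List.pyRange 0 60 1,
      PySem.Int.ofChars? ((PySem.Chars.splitOn start.toList [':']).getD 1 []) = some a ∧
      PySem.Int.ofChars? ((PySem.Chars.splitOn end_.toList [':']).getD 1 []) = some b ∧ a ≤ b))
instance (start : String) (end_ : String) : Decidable (Pre_get_minutes start end_) := by
  unfold Pre_get_minutes; infer_instance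

def pvWitness_get_minutes : String × String := ("00:05", "02:10")

def Spec_get_minutes (start : String) (end_ : String) (out : String) : Prop := out = get_minutes_alt start end_
instance (start : String) (end_ : String) (out : String) : Decidable (Spec_get_minutes start end_ out) := by
  unfold Spec_get_minutes; infer_instance

-- ===== CLAIM (what is proved, stated in full; the proofs are below) =====
def Claim_equal_get_minutes : Prop := ∀ (start : String) (end_ : String), Dom_get_minutes start end_ → Pre_get_minutes start end_ → Spec_get_minutes start end_ (get_minutes start end_)

-- ===== LEMMAS AND PROOFS =====

-- kernel-checked facts about the 60 canonical two-digit fields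
lemma pvBall (P : Nat → Prop) [DecidablePred P]
    (h : ((List.range 60).all fun n => decide (P n)) = true) (n : Nat) (hn : n < 60) : P n :=
  of_decide_eq_true (List.all_eq_true.mp h _ (List.mem_range.mpr hn))

lemma pvBall2 (P : Nat → Nat → Prop) [inst : ∀ m s, Decidable (P m s)]
    (h : ((List.range 60).all fun m => (List.range 60).all fun s => decide (P m s)) = true)
    (m s : Nat) (hm : m < 60) (hs : s < 60) : P m s :=
  of_decide_eq_true (List.all_eq_true.mp (List.all_eq_true.mp h _ (List.mem_range.mpr hm)) _ (List.mem_range.mpr hs))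

lemma pvSplit_all : ((List.range 60).all fun m => (List.range 60).all fun s =>
    decide (PySem.Chars.splitOn (pvMkT (m : Int) (s : Int)) [':'] = [pvPad2 (m : Int), pvPad2 (s : Int)])) = true := by
  decide

lemma pvParse_all : ((List.range 60).all fun n =>
    decide (PySem.Int.ofChars? (pvPad2 (n : Int)) = some (n : Int))) = true := by
  decide

lemma pvParse_pad2 (n : Int) (h0 : 0 ≤ n) (h1 : n ≤ 59) :
    PySem.Int.ofChars? (pvPad2 n) = some n := by
  obtain ⟨k, rfl⟩ : ∃ k : Nat, n = (k : Int) := ⟨n.toNat, (Int.toNat_of_nonneg h0).symm⟩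
  exact pvBall (fun k => PySem.Int.ofChars? (pvPad2 (k : Int)) = some (k : Int)) pvParse_all k (by omega)

lemma pvSplit_mkT (m s : Int) (hm0 : 0 ≤ m) (hm1 : m ≤ 59) (hs0 : 0 ≤ s) (hs1 : s ≤ 59) :
    PySem.Chars.splitOn (pvMkT m s) [':'] = [pvPad2 m, pvPad2 s] := by
  obtain ⟨k, rfl⟩ : ∃ k : Nat, m = (k : Int) := ⟨m.toNat, (Int.toNat_of_nonneg hm0).symm⟩
  obtain ⟨j, rfl⟩ : ∃ j : Nat, s = (j : Int) := ⟨s.toNat, (Int.toNat_of_nonneg hs0).symm⟩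
  exact pvBall2 (fun k j => PySem.Chars.splitOn (pvMkT (k : Int) (j : Int)) [':'] = [pvPad2 (k : Int), pvPad2 (j : Int)])
    pvSplit_all k j (by omega) (by omega)

lemma pvPad2_inj (a b : Int) (ha0 : 0 ≤ a) (ha1 : a ≤ 59) (hb0 : 0 ≤ b) (hb1 : b ≤ 59)
    (h : pvPad2 a = pvPad2 b) : a = b := by
  have h1 := pvParse_pad2 a ha0 ha1
  have h2 := pvParse_pad2 b hb0 hb1
  rw [h, h2] at h1
  exact Option.some.inj h1.symm

lemma pvPad2_eq00_iff (s : Int) (h0 : 0 ≤ s) (h1 : s ≤ 59) : pvPad2 s = ['0','0'] ↔ s = 0 := by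
  constructor
  · intro h
    exact pvPad2_inj s 0 h0 h1 (by omega) (by omega) (h.trans (by decide))
  · intro h; subst h; decide

lemma pvPad2_eq59_iff (s : Int) (h0 : 0 ≤ s) (h1 : s ≤ 59) : pvPad2 s = ['5','9'] ↔ s = 59 := by
  constructor
  · intro h
    exact pvPad2_inj s 59 h0 h1 (by omega) (by omega) (h.trans (by decide))
  · intro h; subst h; decide

lemma pvMkT_inj (m1 s1 m2 s2 : Int) (h1 : 0 ≤ m1) (h2 : m1 ≤ 59) (h3 : 0 ≤ s1) (h4 : s1 ≤ 59)
    (h5 : 0 ≤ m2) (h6 : m2 ≤ 59) (h7 : 0 ≤ s2) (h8 : s2 ≤ 59)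
    (h : pvMkT m1 s1 = pvMkT m2 s2) : m1 = m2 ∧ s1 = s2 := by
  have hs := congrArg (fun l => PySem.Chars.splitOn l [':']) h
  simp only [pvSplit_mkT m1 s1 h1 h2 h3 h4, pvSplit_mkT m2 s2 h5 h6 h7 h8, List.cons.injEq,
    and_true] at hs
  exact ⟨pvPad2_inj _ _ h1 h2 h5 h6 hs.1, pvPad2_inj _ _ h3 h4 h7 h8 hs.2⟩

lemma pvMkT59 (m : Int) : pvPad2 m ++ [':', '5', '9'] = pvMkT m 59 := by
  rw [pvMkT, show pvPad2 59 = ['5','9'] from by decide]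

lemma pvMkT00 (m : Int) : pvPad2 m ++ [':', '0', '0'] = pvMkT m 0 := by
  rw [pvMkT, show pvPad2 0 = ['0','0'] from by decide]

-- one-step unfolding of A's port on canonical inputs
lemma pvGmF_eq (f : Nat) (m1 s1 m2 s2 : Int)
    (h1 : 0 ≤ m1 ∧ m1 ≤ 59) (h2 : 0 ≤ s1 ∧ s1 ≤ 59) (h3 : 0 ≤ m2 ∧ m2 ≤ 59) (h4 : 0 ≤ s2 ∧ s2 ≤ 59) :
    pvGmF (f+1) (pvMkT m1 s1) (pvMkT m2 s2) =
      if pvMkT m1 s1 = pvMkT m2 s2 then pvMkT m1 s1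
      else if pvPad2 m1 = pvPad2 m2 then
        (if pvPad2 s1 = ['0','0'] ∧ pvPad2 s2 = ['5','9'] then pvPad2 m1 ++ [':', '[', '0', '-', '5', ']', '[', '0', '-', '9', ']']
         else pvPad2 m1 ++ [':', '('] ++ pvGsF pvSecFuel (pvPad2 s1) (pvPad2 s2) ++ [')'])
      else
        ((if m1 < 59 ∧ 0 < m2 ∧ 1 < m2 - m1
          then pvGmF f (pvMkT m1 s1) (pvPad2 m1 ++ [':', '5', '9']) ++ '|' :: pvGmF f (pvPad2 (m1+1) ++ [':', '0', '0']) (pvPad2 (m2-1) ++ [':', '5', '9'])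
          else pvGmF f (pvMkT m1 s1) (pvPad2 m1 ++ [':', '5', '9']))
         ++ '|' :: pvGmF f (pvPad2 m2 ++ [':', '0', '0']) (pvMkT m2 s2)) := by
  conv_lhs => rw [pvGmF]
  rw [pvSplit_mkT m1 s1 h1.1 h1.2 h2.1 h2.2, pvSplit_mkT m2 s2 h3.1 h3.2 h4.1 h4.2]
  simp only [pvParse_pad2 m1 h1.1 h1.2, pvParse_pad2 m2 h3.1 h3.2]

-- join algebra
lemma pvJoin_cons (sep x : List Char) (l : List (List Char)) (hl : l ≠ []) :
    PySem.Chars.join sep (x :: l) = x ++ sep ++ PySem.Chars.join sep l := by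
  cases l with
  | nil => exact absurd rfl hl
  | cons q rest => exact PySem.Chars.join_cons_cons sep x q rest

lemma pvJoin_append_singleton (sep y : List Char) :
    ∀ l : List (List Char), l ≠ [] → PySem.Chars.join sep (l ++ [y]) = PySem.Chars.join sep l ++ sep ++ y := by
  intro l
  induction l with
  | nil => intro h; exact absurd rfl h
  | cons x xs ih =>
    intro _
    cases xs with
    | nil =>
      rw [show ([x] ++ [y] : List (List Char)) = [x, y] from rfl,
        PySem.Chars.join_cons_cons, PySem.Chars.join_singleton, PySem.Chars.join_singleton]
    | cons x' xs' =>
      rw [List.cons_append, pvJoin_cons sep x ((x' :: xs') ++ [y]) (by simp),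
        ih (by simp), pvJoin_cons sep x (x' :: xs') (by simp)]
      simp [List.append_assoc]

-- evaluation of B's piece away from the endpoints
lemma pvPieceMid (sm em ss es : List Char) (a b m : Int) (ha : m ≠ a) (hb : m ≠ b) :
    pvPieceB sm em ss es a b m = pvPad2 m ++ [':', '[', '0', '-', '5', ']', '[', '0', '-', '9', ']'] := by
  simp [pvPieceB, pvPieceCore, ha, hb]

-- A on a one-minute block [m:s1, m:59] computes exactly B's first piece
lemma pvPieceFirst (f : Nat) (hf : 1 ≤ f) (m1 s1 m2 s2 : Int)
    (h1 : 0 ≤ m1) (h2 : m1 ≤ 59) (h3 : 0 ≤ s1) (h4 : s1 ≤ 59)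
    (hne : m1 ≠ m2) :
    pvGmF f (pvMkT m1 s1) (pvMkT m1 59) = pvPieceB (pvPad2 m1) (pvPad2 m2) (pvPad2 s1) (pvPad2 s2) m1 m2 m1 := by
  obtain ⟨f', rfl⟩ : ∃ k, f = k + 1 := ⟨f - 1, by omega⟩
  rw [pvGmF_eq f' m1 s1 m1 59 ⟨h1, h2⟩ ⟨h3, h4⟩ ⟨h1, h2⟩ ⟨by omega, by omega⟩]
  by_cases h59 : s1 = 59
  · subst h59
    rw [if_pos rfl]
    simp [pvPieceB, pvPieceCore, hne, pvMkT, show pvPad2 59 = ['5','9'] from by decide]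
  · rw [if_neg (fun h => h59 (pvMkT_inj m1 s1 m1 59 h1 h2 h3 h4 h1 h2 (by omega) (by omega) h).2),
      if_pos rfl]
    have hB59 : ¬ (pvPad2 s1 = ['5','9']) := fun h => h59 ((pvPad2_eq59_iff s1 h3 h4).mp h)
    by_cases h0 : s1 = 0
    · subst h0
      rw [if_pos ⟨by decide, by decide⟩]
      simp [pvPieceB, pvPieceCore, hne, show pvPad2 0 = ['0','0'] from by decide]
    · have hB0 : ¬ (pvPad2 s1 = ['0','0']) := fun h => h0 ((pvPad2_eq00_iff s1 h3 h4).mp h)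
      rw [if_neg (fun h => hB0 h.1)]
      simp [pvPieceB, pvPieceCore, hne, hB59, hB0, show pvPad2 59 = ['5','9'] from by decide, List.append_assoc]

-- A on a one-minute block [m:00, m:s2] computes exactly B's last piece
lemma pvPieceLast (f : Nat) (hf : 1 ≤ f) (m1 s1 m2 s2 : Int)
    (h5 : 0 ≤ m2) (h6 : m2 ≤ 59) (h7 : 0 ≤ s2) (h8 : s2 ≤ 59)
    (hne : m1 ≠ m2) :
    pvGmF f (pvMkT m2 0) (pvMkT m2 s2) = pvPieceB (pvPad2 m1) (pvPad2 m2) (pvPad2 s1) (pvPad2 s2) m1 m2 m2 := by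
  obtain ⟨f', rfl⟩ : ∃ k, f = k + 1 := ⟨f - 1, by omega⟩
  rw [pvGmF_eq f' m2 0 m2 s2 ⟨h5, h6⟩ ⟨by omega, by omega⟩ ⟨h5, h6⟩ ⟨h7, h8⟩]
  have hne' : m2 ≠ m1 := Ne.symm hne
  by_cases h0 : s2 = 0
  · subst h0
    rw [if_pos rfl]
    simp [pvPieceB, pvPieceCore, hne', pvMkT, show pvPad2 0 = ['0','0'] from by decide]
  · rw [if_neg (fun h => h0 (pvMkT_inj m2 0 m2 s2 h5 h6 (by omega) (by omega) h5 h6 h7 h8 h).2.symm),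
      if_pos rfl]
    have hB0 : ¬ (pvPad2 s2 = ['0','0']) := fun h => h0 ((pvPad2_eq00_iff s2 h7 h8).mp h)
    by_cases h59 : s2 = 59
    · subst h59
      rw [if_pos ⟨by decide, by decide⟩]
      simp [pvPieceB, pvPieceCore, hne', show pvPad2 59 = ['5','9'] from by decide,
        show ¬ (['0','0'] : List Char) = ['5','9'] from by decide]
    · have hB59 : ¬ (pvPad2 s2 = ['5','9']) := fun h => h59 ((pvPad2_eq59_iff s2 h7 h8).mp h)
      rw [if_neg (fun h => hB59 h.2)]
      have hBne : ¬ (['0','0'] : List Char) = pvPad2 s2 := fun h =>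
        h0 (pvPad2_inj 0 s2 (by omega) (by omega) h7 h8 ((show pvPad2 0 = ['0','0'] from by decide).trans h)).symm
      simp [pvPieceB, pvPieceCore, hne', hB59, hBne, show pvPad2 0 = ['0','0'] from by decide, List.append_assoc]

-- A on a same-minute interval computes exactly B's single piece
lemma pvSameMin (f : Nat) (hf : 1 ≤ f) (m s1 s2 : Int)
    (h1 : 0 ≤ m) (h2 : m ≤ 59) (h3 : 0 ≤ s1) (h4 : s1 ≤ 59) (h7 : 0 ≤ s2) (h8 : s2 ≤ 59)
    (hlt : s1 < s2) :
    pvGmF f (pvMkT m s1) (pvMkT m s2) = pvPieceB (pvPad2 m) (pvPad2 m) (pvPad2 s1) (pvPad2 s2) m m m := by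
  obtain ⟨f', rfl⟩ : ∃ k, f = k + 1 := ⟨f - 1, by omega⟩
  rw [pvGmF_eq f' m s1 m s2 ⟨h1, h2⟩ ⟨h3, h4⟩ ⟨h1, h2⟩ ⟨h7, h8⟩]
  rw [if_neg (fun h => by
    have := (pvMkT_inj m s1 m s2 h1 h2 h3 h4 h1 h2 h7 h8 h).2; omega), if_pos rfl]
  have hss : ¬ (pvPad2 s1 = pvPad2 s2) := fun h => by
    have := pvPad2_inj s1 s2 h3 h4 h7 h8 h; omega
  by_cases hc : pvPad2 s1 = ['0','0'] ∧ pvPad2 s2 = ['5','9']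
  · rw [if_pos hc]
    simp [pvPieceB, pvPieceCore, hc.1, hc.2]
  · rw [if_neg hc]
    simp [pvPieceB, pvPieceCore, hss, hc, List.append_assoc]

-- A on a full-minute block [a:00, a:59] yields the '[0-5][0-9]' piece
lemma pvBand (f : Nat) (hf : 1 ≤ f) (a : Int) (h1 : 0 ≤ a) (h2 : a ≤ 59) :
    pvGmF f (pvMkT a 0) (pvMkT a 59) = pvPad2 a ++ [':', '[', '0', '-', '5', ']', '[', '0', '-', '9', ']'] := by
  obtain ⟨f', rfl⟩ : ∃ k, f = k + 1 := ⟨f - 1, by omega⟩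
  rw [pvGmF_eq f' a 0 a 59 ⟨h1, h2⟩ ⟨by omega, by omega⟩ ⟨h1, h2⟩ ⟨by omega, by omega⟩]
  rw [if_neg (fun h => by
    have := (pvMkT_inj a 0 a 59 h1 h2 (by omega) (by omega) h1 h2 (by omega) (by omega) h).2; omega),
    if_pos rfl, if_pos ⟨by decide, by decide⟩]

-- A's recursion over a block of full minutes [a:00, b:59] is B's flat join of full-minute pieces
lemma pvGmMid : ∀ g : Nat, ∀ (a b : Int) (f : Nat), 0 ≤ a → a ≤ b → b ≤ 58 → (b - a).toNat = g → g + 1 ≤ f →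
    pvGmF f (pvMkT a 0) (pvMkT b 59) =
      PySem.Chars.join ['|'] ((PySem.List.pyRange a (b+1) 1).map
        (fun m => pvPad2 m ++ [':', '[', '0', '-', '5', ']', '[', '0', '-', '9', ']'])) := by
  intro g
  induction g using Nat.strong_induction_on with
  | _ g IH =>
    intro a b f ha hab hb hg hf
    by_cases heq : a = b
    · subst heq
      rw [pvBand f (by omega) a ha (by omega), PySem.List.pyRange_one_singleton,
        List.map_singleton, PySem.Chars.join_singleton]
    have hlt : a < b := lt_of_le_of_ne hab heq
    obtain ⟨f', rfl⟩ : ∃ k, f = k + 1 := ⟨f - 1, by omega⟩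
    rw [pvGmF_eq f' a 0 b 59 ⟨ha, by omega⟩ ⟨by omega, by omega⟩ ⟨by omega, by omega⟩ ⟨by omega, by omega⟩]
    rw [if_neg (fun h => by
      have := (pvMkT_inj a 0 b 59 ha (by omega) (by omega) (by omega) (by omega) (by omega) (by omega) (by omega) h).1; omega),
      if_neg (fun h => heq (pvPad2_inj a b ha (by omega) (by omega) (by omega) h))]
    rw [pvMkT59 a, pvMkT00 b, pvBand f' (by omega) a ha (by omega), pvBand f' (by omega) b (by omega) (by omega)]
    by_cases hgap : 1 < b - a
    · rw [if_pos ⟨by omega, by omega, hgap⟩, pvMkT00 (a+1), pvMkT59 (b-1),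
        IH (g - 2) (by omega) (a+1) (b-1) f' (by omega) (by omega) (by omega) (by omega) (by omega)]
      rw [show b - 1 + 1 = b from by omega]
      rw [PySem.List.pyRange_one_cons (show a < b + 1 from by omega),
        PySem.List.pyRange_one_succ_right (show a + 1 ≤ b from by omega)]
      rw [List.map_cons, List.map_append, List.map_singleton]
      have hmid : (PySem.List.pyRange (a+1) b 1).map
          (fun m => pvPad2 m ++ [':', '[', '0', '-', '5', ']', '[', '0', '-', '9', ']']) ≠ [] := by
        rw [PySem.List.pyRange_one_cons (show a + 1 < b from by omega)]; simp
      rw [pvJoin_cons _ _ _ (by simp), pvJoin_append_singleton _ _ _ hmid]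
      simp [List.append_assoc]
    · rw [if_neg (fun h => hgap h.2.2)]
      have hb1 : b = a + 1 := by omega
      subst hb1
      rw [PySem.List.pyRange_one_cons (show a < a + 1 + 1 from by omega),
        PySem.List.pyRange_one_singleton, List.map_cons, List.map_singleton,
        PySem.Chars.join_cons_cons, PySem.Chars.join_singleton]
      simp [List.append_assoc]

-- MAIN: A's recursion equals B's flat join on every canonical ordered interval
lemma pvGmMain : ∀ g : Nat, ∀ (m1 s1 m2 s2 : Int) (f : Nat),
    0 ≤ m1 → m1 ≤ 59 → 0 ≤ s1 → s1 ≤ 59 → 0 ≤ m2 → m2 ≤ 59 → 0 ≤ s2 → s2 ≤ 59 →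
    (m1 < m2 ∨ (m1 = m2 ∧ s1 < s2)) → (m2 - m1).toNat = g → g + 2 ≤ f →
    pvGmF f (pvMkT m1 s1) (pvMkT m2 s2) =
      PySem.Chars.join ['|'] ((PySem.List.pyRange m1 (m2+1) 1).map
        (pvPieceB (pvPad2 m1) (pvPad2 m2) (pvPad2 s1) (pvPad2 s2) m1 m2)) := by
  intro g m1 s1 m2 s2 f h1 h2 h3 h4 h5 h6 h7 h8 hlex hg hf
  by_cases hmm : m1 = m2
  · subst hmm
    have hlt : s1 < s2 := by omega
    rw [pvSameMin f (by omega) m1 s1 s2 h1 h2 h3 h4 h7 h8 hlt,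
      PySem.List.pyRange_one_singleton, List.map_singleton, PySem.Chars.join_singleton]
  have hlt : m1 < m2 := by omega
  obtain ⟨f', rfl⟩ : ∃ k, f = k + 1 := ⟨f - 1, by omega⟩
  rw [pvGmF_eq f' m1 s1 m2 s2 ⟨h1, h2⟩ ⟨h3, h4⟩ ⟨h5, h6⟩ ⟨h7, h8⟩]
  rw [if_neg (fun h => by
    have := (pvMkT_inj m1 s1 m2 s2 h1 h2 h3 h4 h5 h6 h7 h8 h).1; omega),
    if_neg (fun h => hmm (pvPad2_inj m1 m2 h1 h2 h5 h6 h))]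
  rw [pvMkT59 m1, pvMkT00 m2,
    pvPieceFirst f' (by omega) m1 s1 m2 s2 h1 h2 h3 h4 hmm,
    pvPieceLast f' (by omega) m1 s1 m2 s2 h5 h6 h7 h8 hmm]
  by_cases hgap : 1 < m2 - m1
  · rw [if_pos ⟨by omega, by omega, hgap⟩, pvMkT00 (m1+1), pvMkT59 (m2-1),
      pvGmMid ((m2 - 1) - (m1 + 1)).toNat (m1+1) (m2-1) f' (by omega) (by omega) (by omega) rfl (by omega)]
    rw [show m2 - 1 + 1 = m2 from by omega]
    rw [PySem.List.pyRange_one_cons (show m1 < m2 + 1 from by omega),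
      PySem.List.pyRange_one_succ_right (show m1 + 1 ≤ m2 from by omega)]
    rw [List.map_cons, List.map_append, List.map_singleton]
    have hcongr : List.map (pvPieceB (pvPad2 m1) (pvPad2 m2) (pvPad2 s1) (pvPad2 s2) m1 m2)
        (PySem.List.pyRange (m1+1) m2 1) =
        List.map (fun m => pvPad2 m ++ [':', '[', '0', '-', '5', ']', '[', '0', '-', '9', ']'])
        (PySem.List.pyRange (m1+1) m2 1) :=
      List.map_congr_left (fun m hm => by
        have := PySem.List.mem_pyRange_one.mp hm
        exact pvPieceMid _ _ _ _ m1 m2 m (by omega) (by omega))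
    rw [hcongr]
    have hmid : (PySem.List.pyRange (m1+1) m2 1).map
        (fun m => pvPad2 m ++ [':', '[', '0', '-', '5', ']', '[', '0', '-', '9', ']']) ≠ [] := by
      rw [PySem.List.pyRange_one_cons (show m1 + 1 < m2 from by omega)]; simp
    rw [pvJoin_cons _ _ _ (by simp), pvJoin_append_singleton _ _ _ hmid]
    simp [List.append_assoc]
  · rw [if_neg (fun h => hgap h.2.2)]
    have hb1 : m2 = m1 + 1 := by omega
    subst hb1
    rw [PySem.List.pyRange_one_cons (show m1 < m1 + 1 + 1 from by omega),
      PySem.List.pyRange_one_singleton, List.map_cons, List.map_singleton,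
      PySem.Chars.join_cons_cons, PySem.Chars.join_singleton]
    simp [List.append_assoc]

-- B's port on canonical distinct inputs is the flat join of pieces
lemma pvAlt_eq (m1 s1 m2 s2 : Int)
    (h1 : 0 ≤ m1) (h2 : m1 ≤ 59) (h3 : 0 ≤ s1) (h4 : s1 ≤ 59)
    (h5 : 0 ≤ m2) (h6 : m2 ≤ 59) (h7 : 0 ≤ s2) (h8 : s2 ≤ 59)
    (hne : pvMkT m1 s1 ≠ pvMkT m2 s2) (hmm : m1 ≠ m2) :
    pvAltGo (pvMkT m1 s1) (pvMkT m2 s2) =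
      PySem.Chars.join ['|'] ((PySem.List.pyRange m1 (m2+1) 1).map
        (pvPieceB (pvPad2 m1) (pvPad2 m2) (pvPad2 s1) (pvPad2 s2) m1 m2)) := by
  rw [pvAltGo, if_neg hne, pvSplit_mkT m1 s1 h1 h2 h3 h4, pvSplit_mkT m2 s2 h5 h6 h7 h8]
  simp only [if_neg (fun h => hmm (pvPad2_inj m1 m2 h1 h2 h5 h6 h)),
    pvParse_pad2 m1 h1 h2, pvParse_pad2 m2 h5 h6]
  rw [PySem.List.foldl_append_singleton_eq_map, List.nil_append]

-- B's port on canonical same-minute inputs is its single piece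
lemma pvAlt_eq_same (m s1 s2 : Int)
    (h1 : 0 ≤ m) (h2 : m ≤ 59) (h3 : 0 ≤ s1) (h4 : s1 ≤ 59) (h7 : 0 ≤ s2) (h8 : s2 ≤ 59)
    (hne : pvMkT m s1 ≠ pvMkT m s2) :
    pvAltGo (pvMkT m s1) (pvMkT m s2) = pvPieceCore (pvPad2 m) (pvPad2 s1) (pvPad2 s2) := by
  rw [pvAltGo, if_neg hne, pvSplit_mkT m s1 h1 h2 h3 h4, pvSplit_mkT m s2 h1 h2 h7 h8]
  simp only [if_true]
  rw [PySem.Chars.join_singleton]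

-- A's same-minute branch and B's same-minute branch compute the same piece (ragged fields allowed)
lemma pvRagged_eq (f : Nat) (s e m ss es : List Char) (hse : s ≠ e)
    (hs : PySem.Chars.splitOn s [':'] = [m, ss]) (he : PySem.Chars.splitOn e [':'] = [m, es])
    (hne : ss ≠ es) :
    pvGmF (f+1) s e = pvAltGo s e := by
  conv_lhs => rw [pvGmF]
  rw [pvAltGo, if_neg hse, if_neg hse, hs, he]
  simp only [if_true, PySem.Chars.join_singleton, pvPieceCore, if_neg hne]
  by_cases hc : ss = ['0','0'] ∧ es = ['5','9']
  · rw [if_pos hc, if_pos hc]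
  · rw [if_neg hc, if_neg hc]
    simp [List.append_assoc]

-- ===== VERDICT (by name: the statement is the Claim_ definition above) =====
theorem get_minutes_spec : Claim_equal_get_minutes := by
  unfold Claim_equal_get_minutes
  intro start end_ _ hpre
  show get_minutes start end_ = get_minutes_alt start end_
  by_cases heq : start = end_
  · subst heq
    rw [get_minutes, get_minutes_alt, pvAltGo, if_pos rfl,
      show pvGmFuel = 255 + 1 from rfl]
    rw [pvGmF, if_pos rfl]
  · rcases hpre with h | ⟨m1, hm1, s1, hs1, hstart, m2, hm2, s2, hs2, hend, hle⟩ | hrag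
    · exact absurd h heq
    swap
    · obtain ⟨hl1, hl2, hhead, hsecne, -⟩ := hrag
      have hsne : start.toList ≠ end_.toList := fun h => heq (String.toList_inj.mp h)
      obtain ⟨m, ss, hps⟩ : ∃ m ss, PySem.Chars.splitOn start.toList [':'] = [m, ss] := by
        rcases hp : PySem.Chars.splitOn start.toList [':'] with _ | ⟨x, _ | ⟨y, _ | _⟩⟩ <;>
          simp_all
      obtain ⟨m', es, hpe⟩ : ∃ m' es, PySem.Chars.splitOn end_.toList [':'] = [m', es] := by
        rcases hp : PySem.Chars.splitOn end_.toList [':'] with _ | ⟨x, _ | ⟨y, _ | _⟩⟩ <;>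
          simp_all
      rw [hps, hpe] at hhead hsecne
      simp only [List.getD] at hhead hsecne
      subst hhead
      rw [get_minutes, get_minutes_alt, show pvGmFuel = 255 + 1 from rfl,
        pvRagged_eq 255 start.toList end_.toList m ss es hsne hps hpe (by simpa using hsecne)]
    have bm1 := PySem.List.mem_pyRange_one.mp hm1
    have bs1 := PySem.List.mem_pyRange_one.mp hs1
    have bm2 := PySem.List.mem_pyRange_one.mp hm2
    have bs2 := PySem.List.mem_pyRange_one.mp hs2
    have hneT : pvMkT m1 s1 ≠ pvMkT m2 s2 := by
      intro h
      exact heq (String.toList_inj.mp (by rw [hstart, hend, h]))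
    have hne' : ¬ (m1 = m2 ∧ s1 = s2) := fun hh =>
      hneT (by rw [hh.1, hh.2])
    have hlex : m1 < m2 ∨ (m1 = m2 ∧ s1 < s2) := by omega
    rw [get_minutes, get_minutes_alt, hstart, hend]
    by_cases hmm : m1 = m2
    · subst hmm
      have hlt : s1 < s2 := by omega
      rw [pvSameMin pvGmFuel (by rw [show pvGmFuel = 256 from rfl]; omega) m1 s1 s2
          (by omega) (by omega) (by omega) (by omega) (by omega) (by omega) hlt,
        pvAlt_eq_same m1 s1 s2 (by omega) (by omega) (by omega) (by omega) (by omega) (by omega) hneT]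
      simp [pvPieceB]
    · rw [pvGmMain (m2 - m1).toNat m1 s1 m2 s2 pvGmFuel (by omega) (by omega) (by omega) (by omega)
          (by omega) (by omega) (by omega) (by omega) hlex rfl
          (by rw [show pvGmFuel = 256 from rfl]; omega),
        pvAlt_eq m1 s1 m2 s2 (by omega) (by omega) (by omega) (by omega)
          (by omega) (by omega) (by omega) (by omega) hneT hmm]
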